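-- pv_equiv track=rewrite | github.com/Drnel/advc_2024_py | src/day_14.py | robot_clump_test
-- ===== SOURCE A (Python) =====
-- def robot_clump_test(robots):
--     clumped_robots = 0
--     for robot1 in robots:
--         left = False
--         right = False
--         up = False
--         down = False
--         for robot2 in robots:
--             x1, y1, x2, y2 = robot1[0], robot1[1], robot2[0], robot2[1]
--             if (x2 == (x1 - 1)) and  (y1 == y2):
--                 left = True
--             if (x2 == (x1 + 1)) and  (y1 == y2):
--                 right = True
--             if (x2 == x1) and  ((y1 - 1) == y2):
--                 up = True
--             if (x2 == x1) and  ((y1 + 1) == y2):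
--                 down = True
--         if left and right and up and down:
--             clumped_robots += 1
--     return clumped_robots
-- ===== SOURCE B (Python) =====
-- def robot_clump_test(robots):
--     # Scatter phase: each distinct occupied cell donates one "degree" to each
--     # of its four orthogonal neighbours; a robot is clumped iff its own cell
--     # received a degree of 4.
--     deg = {}
--     for (x, y) in set(robots):
--         for q in ((x + 1, y), (x - 1, y), (x, y + 1), (x, y - 1)):
--             deg[q] = deg.get(q, 0) + 1
--     return sum(1 for r in robots if deg.get((r[0], r[1]), 0) == 4)
-- ===== Notes on version B (the rewrite author's own statement) =====
-- stated objective: faster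
-- what changed: Replaces A's per-robot nested scan for the four neighbour flags with a scatter pass: each distinct position adds +1 to a degree counter at its four neighbour cells, then one pass counts robots whose own cell has degree 4.
import Mathlib
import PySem

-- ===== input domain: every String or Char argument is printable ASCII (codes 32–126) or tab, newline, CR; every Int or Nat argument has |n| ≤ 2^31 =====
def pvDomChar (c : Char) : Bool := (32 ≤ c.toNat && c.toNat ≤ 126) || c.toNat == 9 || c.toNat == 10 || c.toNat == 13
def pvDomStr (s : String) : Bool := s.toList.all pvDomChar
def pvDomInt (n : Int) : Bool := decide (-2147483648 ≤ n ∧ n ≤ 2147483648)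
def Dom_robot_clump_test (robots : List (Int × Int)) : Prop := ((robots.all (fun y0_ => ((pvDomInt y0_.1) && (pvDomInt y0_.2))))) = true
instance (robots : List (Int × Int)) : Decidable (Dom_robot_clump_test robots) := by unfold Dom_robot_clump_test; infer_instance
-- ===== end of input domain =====

-- B replaces A's quadratic per-robot neighbour scan with a scatter pass: every distinct
-- position adds +1 to a degree counter at its four neighbour cells, then one pass counts
-- robots whose own cell has degree 4 (faster: one linear scatter instead of nested scans).

-- ===== PORT A =====
def robot_clump_test (robots : List (Int × Int)) : Int :=
  robots.foldl (fun clumped_robots robot1 =>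
    let st := robots.foldl (fun (st : Bool × Bool × Bool × Bool) robot2 =>
      let l := st.1; let r := st.2.1; let u := st.2.2.1; let d := st.2.2.2
      let l := if robot2.1 == robot1.1 - 1 && robot1.2 == robot2.2 then true else l
      let r := if robot2.1 == robot1.1 + 1 && robot1.2 == robot2.2 then true else r
      let u := if robot2.1 == robot1.1 && robot1.2 - 1 == robot2.2 then true else u
      let d := if robot2.1 == robot1.1 && robot1.2 + 1 == robot2.2 then true else d
      (l, r, u, d)) (false, false, false, false)
    if st.1 && st.2.1 && st.2.2.1 && st.2.2.2 then clumped_robots + 1 else clumped_robots) 0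

-- ===== PORT B =====
def robot_clump_test_alt (robots : List (Int × Int)) : Int :=
  let deg : PySem.Dict (Int × Int) Int :=
    (PySem.Set.ofList robots).foldl
      (fun d p => [(p.1 + 1, p.2), (p.1 - 1, p.2), (p.1, p.2 + 1), (p.1, p.2 - 1)].foldl
        (fun d q => d.modify q 0 (· + 1)) d) PySem.Dict.empty
  (robots.map (fun r => if deg.getD (r.1, r.2) 0 == 4 then (1 : Int) else 0)).sum

-- ===== PRECONDITION & SPEC =====
def Spec_robot_clump_test (robots : List (Int × Int)) (out : Int) : Prop := out = robot_clump_test_alt robots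
instance (robots : List (Int × Int)) (out : Int) : Decidable (Spec_robot_clump_test robots out) := by unfold Spec_robot_clump_test; infer_instance

-- ===== CLAIM (what is proved, stated in full; the proofs are below) =====
def Claim_equal_robot_clump_test : Prop := ∀ (robots : List (Int × Int)), Dom_robot_clump_test robots → Spec_robot_clump_test robots (robot_clump_test robots)

-- ===== LEMMAS AND PROOFS =====

-- A's inner fold: the four flags are `any` over the list.
theorem flags_fold (robots : List (Int × Int)) (x1 y1 : Int) (init : Bool × Bool × Bool × Bool) :
    robots.foldl (fun (st : Bool × Bool × Bool × Bool) robot2 =>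
      let l := st.1; let r := st.2.1; let u := st.2.2.1; let d := st.2.2.2
      let l := if robot2.1 == x1 - 1 && y1 == robot2.2 then true else l
      let r := if robot2.1 == x1 + 1 && y1 == robot2.2 then true else r
      let u := if robot2.1 == x1 && y1 - 1 == robot2.2 then true else u
      let d := if robot2.1 == x1 && y1 + 1 == robot2.2 then true else d
      (l, r, u, d)) init
    = (init.1 || robots.any (fun r2 => r2.1 == x1 - 1 && y1 == r2.2),
       init.2.1 || robots.any (fun r2 => r2.1 == x1 + 1 && y1 == r2.2),
       init.2.2.1 || robots.any (fun r2 => r2.1 == x1 && y1 - 1 == r2.2),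
       init.2.2.2 || robots.any (fun r2 => r2.1 == x1 && y1 + 1 == r2.2)) := by
  induction robots generalizing init with
  | nil => simp
  | cons hd tl ih =>
    simp only [List.foldl_cons, List.any_cons]
    obtain ⟨l, r, u, d⟩ := init
    dsimp only
    rw [ih]
    simp [beq_eq_decide, Bool.or_comm, Bool.or_assoc]

theorem any_eq_mem (robots : List (Int × Int)) (a b : Int) :
    robots.any (fun r2 => r2.1 == a && b == r2.2) = decide ((a, b) ∈ robots) := by
  rw [Bool.eq_iff_iff]
  simp only [List.any_eq_true, Bool.and_eq_true, beq_iff_eq, decide_eq_true_eq]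
  constructor
  · rintro ⟨r2, hm, h1, h2⟩
    obtain ⟨p, q⟩ := r2
    simp_all
  · intro hm
    exact ⟨(a, b), hm, rfl, rfl⟩

-- The nested scatter fold is a single fold over the flattened neighbour list.
theorem foldl_foldl_eq_foldl_flatMap {α β γ : Type} (g : α → List β) (f : γ → β → γ)
    (l : List α) (init : γ) :
    l.foldl (fun d p => (g p).foldl f d) init = (l.flatMap g).foldl f init := by
  induction l generalizing init with
  | nil => rfl
  | cons hd tl ih => simp [List.flatMap_cons, List.foldl_append, ih]

-- Count of q in the flattened neighbour lists = counts of q's four neighbours.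
theorem count_flatMap_nbrs (pts : List (Int × Int)) (q : Int × Int) :
    (pts.flatMap (fun p => [(p.1 + 1, p.2), (p.1 - 1, p.2), (p.1, p.2 + 1), (p.1, p.2 - 1)])).count q
    = pts.count (q.1 - 1, q.2) + pts.count (q.1 + 1, q.2)
      + pts.count (q.1, q.2 - 1) + pts.count (q.1, q.2 + 1) := by
  induction pts with
  | nil => rfl
  | cons p tl ih =>
    simp only [List.flatMap_cons, List.count_append, List.count_cons, ih]
    obtain ⟨a, b⟩ := p
    obtain ⟨c, d⟩ := q
    simp only [List.count_nil, beq_iff_eq, Prod.ext_iff]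
    split_ifs <;> omega

-- Degree lookup characterised by membership of the four neighbours.
theorem deg_getD (robots : List (Int × Int)) (q : Int × Int) :
    ((PySem.Set.ofList robots).foldl
      (fun d p => [(p.1 + 1, p.2), (p.1 - 1, p.2), (p.1, p.2 + 1), (p.1, p.2 - 1)].foldl
        (fun d q => d.modify q 0 (· + 1)) d) PySem.Dict.empty).getD q 0
    = (if (q.1 - 1, q.2) ∈ robots then (1 : Int) else 0)
      + (if (q.1 + 1, q.2) ∈ robots then 1 else 0)
      + (if (q.1, q.2 - 1) ∈ robots then 1 else 0)
      + (if (q.1, q.2 + 1) ∈ robots then 1 else 0) := by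
  rw [foldl_foldl_eq_foldl_flatMap]
  rw [PySem.Dict.getD_foldl_modify_add_one]
  rw [PySem.Dict.getD_empty, count_flatMap_nbrs]
  have hnd : (PySem.Set.ofList robots).Nodup := PySem.Set.nodup_ofList robots
  have hcnt : ∀ u : Int × Int,
      ((PySem.Set.ofList robots).count u : Int) = if u ∈ robots then 1 else 0 := by
    intro u
    by_cases hu : u ∈ robots
    · rw [List.count_eq_one_of_mem hnd ((PySem.Set.mem_ofList robots u).mpr hu)]
      simp [hu]
    · rw [List.count_eq_zero_of_not_mem (fun h => hu ((PySem.Set.mem_ofList robots u).mp h))]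
      simp [hu]
  push_cast
  rw [hcnt, hcnt, hcnt, hcnt]
  ring

theorem robot_clump_test_spec : Claim_equal_robot_clump_test := by
  intro robots _
  unfold Spec_robot_clump_test robot_clump_test robot_clump_test_alt
  simp only [flags_fold, Bool.false_or, any_eq_mem]
  rw [PySem.List.foldl_if_add_one, PySem.List.sum_map_ite_one_zero]
  have : ∀ r : Int × Int,
      (((PySem.Set.ofList robots).foldl
        (fun d p => [(p.1 + 1, p.2), (p.1 - 1, p.2), (p.1, p.2 + 1), (p.1, p.2 - 1)].foldl
          (fun d q => d.modify q 0 (· + 1)) d)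
          (PySem.Dict.empty : PySem.Dict (Int × Int) Int)).getD (r.1, r.2) 0 == 4)
      = (decide ((r.1 - 1, r.2) ∈ robots) && decide ((r.1 + 1, r.2) ∈ robots)
         && decide ((r.1, r.2 - 1) ∈ robots) && decide ((r.1, r.2 + 1) ∈ robots)) := by
    intro r
    rw [deg_getD]
    by_cases h1 : (r.1 - 1, r.2) ∈ robots <;>
      by_cases h2 : (r.1 + 1, r.2) ∈ robots <;>
      by_cases h3 : (r.1, r.2 - 1) ∈ robots <;>
      by_cases h4 : (r.1, r.2 + 1) ∈ robots <;>
      simp [h1, h2, h3, h4]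
  simp only [this]
  norm_num
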